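-- pv_equiv track=rewrite | github.com/nupsea/content-pal | src/archive/asset_ltr.py | _normalize_expand
-- ===== SOURCE A (Python) =====
-- def _normalize_expand(q: str, enable=True) -> str:
--     qn = q.lower().strip().replace("sci-fi","sci fi").replace("&"," and ")
--     if not enable: return qn
--     adds = []
--     if "kids" in qn or "family" in qn: adds += ["children","preschool","toddler","family"]
--     if any(t in qn for t in ("romantic","romance","romcom")): adds += ["love","relationships","romcom"]
--     if any(t in qn for t in ("mature","adult")): adds += ["tv ma","r","mature"]
--     if any(t in qn for t in ("series"," tv "," tv-"," tv_"," show")): adds += ["tv show","series"]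
--     for hint,country in [("german","germany"),("korean","south korea"),("japanese","japan"),
--                          ("french","france"),("spanish","spain"),("italian","italy")]:
--         if hint in qn: adds.append(country)
--     return qn + (" " + " ".join(adds) if adds else "")
-- ===== SOURCE B (Python) =====
-- _TRIGGERS = [
--     ("kids", 0), ("family", 0),
--     ("romantic", 1), ("romance", 1), ("romcom", 1),
--     ("mature", 2), ("adult", 2),
--     ("series", 3), (" tv ", 3), (" tv-", 3), (" tv_", 3), (" show", 3),
--     ("german", 4), ("korean", 5), ("japanese", 6),
--     ("french", 7), ("spanish", 8), ("italian", 9),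
-- ]
-- _ADDITIONS = [
--     ["children", "preschool", "toddler", "family"],
--     ["love", "relationships", "romcom"],
--     ["tv ma", "r", "mature"],
--     ["tv show", "series"],
--     ["germany"], ["south korea"], ["japan"],
--     ["france"], ["spain"], ["italy"],
-- ]
--
-- def _normalize_expand(q: str, enable=True) -> str:
--     qn = q.lower().strip().replace("sci-fi", "sci fi").replace("&", " and ")
--     if not enable:
--         return qn
--     # one scan over the text: at each position, try every trigger as a prefix
--     hit = [False] * len(_ADDITIONS)
--     for i in range(len(qn)):
--         for t, c in _TRIGGERS:
--             if not hit[c] and qn.startswith(t, i):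
--                 hit[c] = True
--     adds = [w for c, flag in enumerate(hit) if flag for w in _ADDITIONS[c]]
--     return qn + (" " + " ".join(adds) if adds else "")
-- ===== Notes on version B (the rewrite author's own statement) =====
-- stated objective: alternative
-- what changed: Replaces A's per-trigger substring searches ('t in qn' for every trigger in every if-block plus the language loop) with a single left-to-right scan over the text positions that tests every trigger as a prefix at each position into a category flag array, then emits the additions from the flags in one comprehension.
import Mathlib
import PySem

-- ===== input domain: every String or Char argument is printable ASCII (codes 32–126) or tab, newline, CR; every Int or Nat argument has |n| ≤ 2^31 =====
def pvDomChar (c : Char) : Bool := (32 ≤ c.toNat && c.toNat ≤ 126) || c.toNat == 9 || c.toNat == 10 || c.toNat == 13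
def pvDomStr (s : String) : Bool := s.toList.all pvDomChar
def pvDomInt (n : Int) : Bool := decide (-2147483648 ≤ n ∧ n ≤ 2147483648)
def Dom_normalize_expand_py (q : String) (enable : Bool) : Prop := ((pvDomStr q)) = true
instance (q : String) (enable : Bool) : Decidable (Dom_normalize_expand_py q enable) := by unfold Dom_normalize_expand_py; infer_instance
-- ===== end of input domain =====

-- B replaces A's per-trigger substring searches and if-chains with one left-to-right scan over text positions testing all triggers as prefixes into a category flag array (alternative decomposition, same cost); same output.


-- ===== PORT A =====
def normalize_expand_py (q : String) (enable : Bool) : String :=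
  let qn := PySem.Str.replace (PySem.Str.replace (PySem.Str.strip (PySem.Str.lower q)) "sci-fi" "sci fi") "&" " and "
  if !enable then qn
  else
    let adds : List String := []
    let adds := if PySem.Str.isIn "kids" qn || PySem.Str.isIn "family" qn then
                  adds ++ ["children", "preschool", "toddler", "family"] else adds
    let adds := if ["romantic", "romance", "romcom"].any (fun t => PySem.Str.isIn t qn) then
                  adds ++ ["love", "relationships", "romcom"] else adds
    let adds := if ["mature", "adult"].any (fun t => PySem.Str.isIn t qn) then
                  adds ++ ["tv ma", "r", "mature"] else adds
    let adds := if ["series", " tv ", " tv-", " tv_", " show"].any (fun t => PySem.Str.isIn t qn) then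
                  adds ++ ["tv show", "series"] else adds
    let adds := [("german", "germany"), ("korean", "south korea"), ("japanese", "japan"),
                 ("french", "france"), ("spanish", "spain"), ("italian", "italy")].foldl
        (fun adds hc => if PySem.Str.isIn hc.1 qn then adds ++ [hc.2] else adds) adds
    qn ++ (if adds.isEmpty then "" else " " ++ PySem.Str.join " " adds)

-- ===== PORT B =====
-- the (trigger, category) table of Source B; triggers are kept as List Char (string facts live on the list side)
def pvTriggers : List (List Char × Nat) :=
  [("kids".toList, 0), ("family".toList, 0),
   ("romantic".toList, 1), ("romance".toList, 1), ("romcom".toList, 1),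
   ("mature".toList, 2), ("adult".toList, 2),
   ("series".toList, 3), (" tv ".toList, 3), (" tv-".toList, 3), (" tv_".toList, 3), (" show".toList, 3),
   ("german".toList, 4), ("korean".toList, 5), ("japanese".toList, 6),
   ("french".toList, 7), ("spanish".toList, 8), ("italian".toList, 9)]

def pvAdditions : List (List String) :=
  [["children", "preschool", "toddler", "family"],
   ["love", "relationships", "romcom"],
   ["tv ma", "r", "mature"],
   ["tv show", "series"],
   ["germany"], ["south korea"], ["japan"],
   ["france"], ["spain"], ["italy"]]

-- qn.startswith(t, i) is ported as PySem.Chars.startswith (cs.drop i) t — exact for 0 ≤ i ≤ len(qn),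
-- and range(len(qn)) of nonnegative indices as List.range cs.length.
def normalize_expand_py_alt (q : String) (enable : Bool) : String :=
  let qn := PySem.Str.replace (PySem.Str.replace (PySem.Str.strip (PySem.Str.lower q)) "sci-fi" "sci fi") "&" " and "
  if !enable then qn
  else
    let cs := qn.toList
    let hit := (List.range cs.length).foldl
      (fun hit i => pvTriggers.foldl
        (fun hit tc =>
          if !(hit.getD tc.2 false) && PySem.Chars.startswith (cs.drop i) tc.1 then hit.set tc.2 true else hit)
        hit)
      (List.replicate pvAdditions.length false)
    let adds := (PySem.List.enumerate hit).flatMap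
      (fun p => if p.2 then pvAdditions.getD p.1.toNat [] else [])
    qn ++ (if adds.isEmpty then "" else " " ++ PySem.Str.join " " adds)

-- ===== PRECONDITION & SPEC =====
def Spec_normalize_expand_py (q : String) (enable : Bool) (out : String) : Prop := out = normalize_expand_py_alt q enable
instance (q : String) (enable : Bool) (out : String) : Decidable (Spec_normalize_expand_py q enable out) := by unfold Spec_normalize_expand_py; infer_instance

-- ===== CLAIM (what is proved, stated in full; the proofs are below) =====
def Claim_equal_normalize_expand_py : Prop := ∀ (q : String) (enable : Bool), Dom_normalize_expand_py q enable → Spec_normalize_expand_py q enable (normalize_expand_py q enable)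

-- ===== LEMMAS AND PROOFS =====

-- one inner pass over the trigger table sets exactly the categories with a trigger matching at position i
theorem pv_inner_getD (cs : List Char) (i : Nat) :
    ∀ (ts : List (List Char × Nat)) (hit : List Bool) (c : Nat), c < hit.length →
      (∀ tc ∈ ts, tc.2 < hit.length) →
      (ts.foldl (fun hit tc =>
          if !(hit.getD tc.2 false) && PySem.Chars.startswith (cs.drop i) tc.1 then hit.set tc.2 true else hit)
        hit).getD c false
      = (hit.getD c false || ts.any (fun tc => tc.2 == c && PySem.Chars.startswith (cs.drop i) tc.1)) := by
  intro ts
  induction ts with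
  | nil => intro hit c hc _; simp
  | cons tc ts ih =>
    intro hit c hc hts
    have hmem : tc.2 < hit.length := hts tc (by simp)
    have hts' : ∀ x ∈ ts, x.2 < hit.length := fun x hx => hts x (List.mem_cons_of_mem _ hx)
    simp only [List.foldl_cons, List.any_cons]
    by_cases hset : (!(hit.getD tc.2 false) && PySem.Chars.startswith (cs.drop i) tc.1) = true
    · rw [if_pos hset, ih _ c (by simpa using hc) (by simpa using hts')]
      obtain ⟨h1, h2⟩ := Bool.and_eq_true_iff.mp hset
      by_cases hcc : tc.2 = c
      · subst hcc; simp [List.getD, List.getElem?_set_self hmem, h2]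
      · have hb : (tc.2 == c) = false := by simp [hcc]
        simp [List.getD, List.getElem?_set_ne hcc, hb]
    · rw [if_neg hset, ih _ c hc hts']
      by_cases h : hit.getD tc.2 false = true
      · by_cases hcc : tc.2 = c
        · subst hcc; simp only [List.getD] at h ⊢; simp [h]
        · have hb : (tc.2 == c) = false := by simp [hcc]
          simp [hb]
      · have h' : hit.getD tc.2 false = false := by simpa using h
        have hsw : PySem.Chars.startswith (cs.drop i) tc.1 = false := by
          by_contra hx
          rw [Bool.not_eq_false] at hx
          exact hset (by simp only [List.getD] at h' ⊢; simp [h', hx])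
        simp [hsw]

theorem pv_inner_length (cs : List Char) (i : Nat) (ts : List (List Char × Nat)) (hit : List Bool) :
    (ts.foldl (fun hit tc =>
        if !(hit.getD tc.2 false) && PySem.Chars.startswith (cs.drop i) tc.1 then hit.set tc.2 true else hit)
      hit).length = hit.length := by
  induction ts generalizing hit with
  | nil => rfl
  | cons tc ts ih =>
    simp only [List.foldl_cons]
    split_ifs
    · rw [ih]; simp
    · rw [ih]

theorem pv_outer_len (cs : List Char) (m : Nat) (h0 : List Bool) :
    ((List.range m).foldl
      (fun hit i => pvTriggers.foldl
        (fun hit tc =>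
          if !(hit.getD tc.2 false) && PySem.Chars.startswith (cs.drop i) tc.1 then hit.set tc.2 true else hit)
        hit)
      h0).length = h0.length := by
  induction m generalizing h0 with
  | zero => rfl
  | succ m ihm => rw [List.range_succ, List.foldl_append, List.foldl_cons, List.foldl_nil,
      pv_inner_length, ihm]

-- the full position scan sets exactly the categories with a trigger occurring anywhere in cs
theorem pv_outer_getD (cs : List Char) :
    ∀ (n : Nat) (hit : List Bool) (c : Nat), c < hit.length →
      (∀ tc ∈ pvTriggers, tc.2 < hit.length) →
      ((List.range n).foldl
        (fun hit i => pvTriggers.foldl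
          (fun hit tc =>
            if !(hit.getD tc.2 false) && PySem.Chars.startswith (cs.drop i) tc.1 then hit.set tc.2 true else hit)
          hit)
        hit).getD c false
      = (hit.getD c false ||
          (List.range n).any (fun i => pvTriggers.any (fun tc => tc.2 == c && PySem.Chars.startswith (cs.drop i) tc.1))) := by
  intro n
  induction n with
  | zero => intro hit c hc _; simp
  | succ n ih =>
    intro hit c hc hts
    rw [List.range_succ, List.foldl_append, List.any_append, List.foldl_cons, List.foldl_nil,
        List.any_cons, List.any_nil]
    rw [pv_inner_getD cs n pvTriggers _ c (by rw [pv_outer_len]; exact hc)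
          (fun x hx => by rw [pv_outer_len]; exact hts x hx)]
    rw [ih hit c hc hts]
    simp [Bool.or_assoc]
-- a bounded position scan with a nonempty pattern is exactly 'sub in s'
theorem pv_any_startswith_eq_isIn (cs t : List Char) (ht : t ≠ []) :
    (List.range cs.length).any (fun i => PySem.Chars.startswith (cs.drop i) t) = PySem.Chars.isIn t cs := by
  rcases Bool.eq_false_or_eq_true (PySem.Chars.isIn t cs) with h | h <;> rw [h]
  · rw [List.any_eq_true]
    have := (PySem.Chars.exists_prefix_drop_iff_isIn (s := cs) (sub := t)).mpr h
    obtain ⟨j, hj⟩ := this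
    have hjlt : j < cs.length := by
      by_contra hge
      rw [List.drop_eq_nil_of_le (by omega)] at hj
      exact ht (List.prefix_nil.mp hj)
    exact ⟨j, List.mem_range.mpr hjlt, (PySem.Chars.startswith_iff _ _).mpr hj⟩
  · rw [List.any_eq_false]
    intro i hi hsw
    have hex : ∃ j, t <+: cs.drop j := ⟨i, (PySem.Chars.startswith_iff _ _).mp hsw⟩
    rw [PySem.Chars.exists_prefix_drop_iff_isIn] at hex
    simp [h] at hex

-- any distributes over ||
theorem pv_any_or {α : Type} (l : List α) (p q : α → Bool) :
    (l.any fun x => p x || q x) = (l.any p || l.any q) := by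
  induction l with
  | nil => rfl
  | cons x xs ih => simp only [List.any_cons, ih]; cases p x <;> cases q x <;> simp

-- the flag array after the scan, as a literal list of per-category match flags
theorem pv_hit_eq (cs : List Char) :
    ((List.range cs.length).foldl
      (fun hit i => pvTriggers.foldl
        (fun hit tc =>
          if !(hit.getD tc.2 false) && PySem.Chars.startswith (cs.drop i) tc.1 then hit.set tc.2 true else hit)
        hit)
      (List.replicate pvAdditions.length false))
    = (List.range 10).map (fun c =>
        (List.range cs.length).any (fun i =>
          pvTriggers.any (fun tc => tc.2 == c && PySem.Chars.startswith (cs.drop i) tc.1))) := by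
  apply List.ext_getElem
  · rw [pv_outer_len]; simp [pvAdditions]
  · intro c h1 h2
    have hc10 : c < 10 := by simpa using h2
    have hrep : c < (List.replicate pvAdditions.length (false : Bool)).length := by
      simp [pvAdditions]; omega
    have hkey := pv_outer_getD cs cs.length (List.replicate pvAdditions.length false) c hrep
      (by intro tc htc; simp only [List.length_replicate]; fin_cases htc <;> simp [pvAdditions])
    rw [List.getD_eq_getElem?_getD, List.getElem?_eq_getElem h1, Option.getD_some] at hkey
    rw [hkey, List.getElem_map, List.getElem_range]
    simp

theorem pv_ite_append {α : Type} (g : Bool) (a x : List α) :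
    (if g then a ++ x else a) = a ++ (if g then x else []) := by
  cases g <;> simp

-- ===== VERDICT (by name: the statement is the Claim_ definition above) =====
theorem normalize_expand_py_spec : Claim_equal_normalize_expand_py := by
  intro q enable _
  show normalize_expand_py q enable = normalize_expand_py_alt q enable
  cases enable with
  | false => simp only [normalize_expand_py, normalize_expand_py_alt, Bool.not_false, if_true]
  | true =>
    simp only [normalize_expand_py, normalize_expand_py_alt, Bool.not_true, Bool.false_eq_true, if_false]
    generalize PySem.Str.replace (PySem.Str.replace (PySem.Str.strip (PySem.Str.lower q)) "sci-fi" "sci fi") "&" " and " = qn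
    rw [pv_hit_eq]
    simp only [show List.range 10 = [0,1,2,3,4,5,6,7,8,9] from rfl, List.map_cons, List.map_nil,
      pvTriggers, pvAdditions, List.any_cons, List.any_nil, List.foldl_cons, List.foldl_nil,
      PySem.List.enumerate_cons, PySem.List.enumerate_nil, List.flatMap_cons, List.flatMap_nil]
    simp only [Nat.reduceBEq, beq_self_eq_true, Bool.true_and, Bool.false_and, Bool.false_or, Bool.or_false]
    simp only [pv_any_or]
    rw [pv_any_startswith_eq_isIn qn.toList "kids".toList (by decide),
        pv_any_startswith_eq_isIn qn.toList "family".toList (by decide),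
        pv_any_startswith_eq_isIn qn.toList "romantic".toList (by decide),
        pv_any_startswith_eq_isIn qn.toList "romance".toList (by decide),
        pv_any_startswith_eq_isIn qn.toList "romcom".toList (by decide),
        pv_any_startswith_eq_isIn qn.toList "mature".toList (by decide),
        pv_any_startswith_eq_isIn qn.toList "adult".toList (by decide),
        pv_any_startswith_eq_isIn qn.toList "series".toList (by decide),
        pv_any_startswith_eq_isIn qn.toList " tv ".toList (by decide),
        pv_any_startswith_eq_isIn qn.toList " tv-".toList (by decide),
        pv_any_startswith_eq_isIn qn.toList " tv_".toList (by decide),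
        pv_any_startswith_eq_isIn qn.toList " show".toList (by decide),
        pv_any_startswith_eq_isIn qn.toList "german".toList (by decide),
        pv_any_startswith_eq_isIn qn.toList "korean".toList (by decide),
        pv_any_startswith_eq_isIn qn.toList "japanese".toList (by decide),
        pv_any_startswith_eq_isIn qn.toList "french".toList (by decide),
        pv_any_startswith_eq_isIn qn.toList "spanish".toList (by decide),
        pv_any_startswith_eq_isIn qn.toList "italian".toList (by decide)]
    simp only [PySem.Str.isIn_eq]
    simp only [← List.append_assoc]
    simp only [pv_ite_append, List.nil_append]
    simp [List.append_assoc, List.getD]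
    congr
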